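-- pv_equiv track=rewrite | github.com/hambonesoftware/SimpleSpecs2 | backend/services/header_match.py | _scan_order
-- ===== SOURCE A (Python) =====
-- from typing import Dict, List, Tuple
--
-- def _scan_order(hint_page: int | None, pages_sorted: List[int], band: int) -> List[int]:
--     seen: set[int] = set()
--     ordered: List[int] = []
--     if hint_page:
--         if hint_page in pages_sorted:
--             ordered.append(hint_page)
--             seen.add(hint_page)
--         for delta in range(1, band + 1):
--             lower = hint_page - delta
--             upper = hint_page + delta
--             if lower in pages_sorted and lower not in seen:
--                 ordered.append(lower)
--                 seen.add(lower)
--             if upper in pages_sorted and upper not in seen: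
--                 ordered.append(upper)
--                 seen.add(upper)
--     for page in pages_sorted:
--         if page not in seen:
--             ordered.append(page)
--     return ordered
-- ===== SOURCE B (Python) =====
-- from typing import List
--
-- def _scan_order(hint_page: int | None, pages_sorted: List[int], band: int) -> List[int]:
--     if not hint_page:
--         return list(pages_sorted)
--     seen: set[int] = set()
--     in_band: List[int] = []
--     out_band: List[int] = []
--     for p in pages_sorted:
--         if p == hint_page or abs(p - hint_page) <= band:
--             if p not in seen:
--                 seen.add(p)
--                 in_band.append(p)
--         else:
--             out_band.append(p)
--     # hint first, then increasing distance, lower page before upper at equal distance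
--     in_band.sort(key=lambda p: 2 * abs(p - hint_page) + (p >= hint_page))
--     return in_band + out_band
-- ===== Notes on version B (the rewrite author's own statement) =====
-- stated objective: alternative
-- what changed: Replaces A's probing loop over every delta in 1..band (each doing two membership scans of the page list) by a single split pass over the pages into an in-band (first-occurrence-deduplicated) list and an out-of-band list, then a key sort of the in-band pages by (distance to hint, lower-before-upper).
import Mathlib
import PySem

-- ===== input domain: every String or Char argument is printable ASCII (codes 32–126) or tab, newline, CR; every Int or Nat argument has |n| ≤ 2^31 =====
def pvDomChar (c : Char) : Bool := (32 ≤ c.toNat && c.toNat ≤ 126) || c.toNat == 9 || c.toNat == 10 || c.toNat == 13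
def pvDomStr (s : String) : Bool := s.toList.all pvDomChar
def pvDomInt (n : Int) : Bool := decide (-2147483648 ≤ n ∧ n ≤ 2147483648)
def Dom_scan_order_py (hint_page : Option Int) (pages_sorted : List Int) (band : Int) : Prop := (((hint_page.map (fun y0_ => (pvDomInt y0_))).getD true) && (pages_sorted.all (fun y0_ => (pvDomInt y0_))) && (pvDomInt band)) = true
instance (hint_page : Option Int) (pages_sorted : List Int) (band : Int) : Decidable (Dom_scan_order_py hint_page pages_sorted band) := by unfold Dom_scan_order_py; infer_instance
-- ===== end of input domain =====

-- B replaces A's band-wide probing loop (O(band) membership scans over the page list) by a single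
-- split pass over the pages followed by a key sort of the in-band pages; same return value, no mutation.

-- ===== PORT A =====
-- the `if hint_page:` block of A: builds (seen, ordered) before the final loop
def scan_order_seed (hint_page : Option Int) (pages_sorted : List Int) (band : Int) :
    PySem.Set Int × List Int :=
  match hint_page with
    | none => (PySem.Set.empty, [])          -- `if hint_page:` is False
    | some h =>
      if h ≠ 0 then                          -- `if hint_page:` truthiness of the int
        let st0 : PySem.Set Int × List Int :=
          if pages_sorted.contains h then (PySem.Set.add PySem.Set.empty h, [h])
          else (PySem.Set.empty, [])
        (PySem.List.pyRange 1 (band + 1)).foldl (fun st delta =>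
          let lower := h - delta
          let upper := h + delta
          let st1 := if pages_sorted.contains lower && !(PySem.Set.contains st.1 lower)
                     then (PySem.Set.add st.1 lower, st.2 ++ [lower]) else st
          if pages_sorted.contains upper && !(PySem.Set.contains st1.1 upper)
          then (PySem.Set.add st1.1 upper, st1.2 ++ [upper]) else st1) st0
      else (PySem.Set.empty, [])

def scan_order_py (hint_page : Option Int) (pages_sorted : List Int) (band : Int) : List Int :=
  let st := scan_order_seed hint_page pages_sorted band
  pages_sorted.foldl (fun ordered page =>
    if !(PySem.Set.contains st.1 page) then ordered ++ [page] else ordered) st.2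

-- ===== PORT B =====
def scan_order_py_alt (hint_page : Option Int) (pages_sorted : List Int) (band : Int) : List Int :=
  match hint_page with
  | none => pages_sorted                     -- `if not hint_page: return list(pages_sorted)`
  | some h =>
    if h = 0 then pages_sorted
    else
      -- one pass: (seen, in_band, out_band)
      let st : PySem.Set Int × List Int × List Int :=
        pages_sorted.foldl (fun st p =>
          if p = h ∨ |p - h| ≤ band then
            if PySem.Set.contains st.1 p then st
            else (PySem.Set.add st.1 p, st.2.1 ++ [p], st.2.2)
          else (st.1, st.2.1, st.2.2 ++ [p])) (PySem.Set.empty, [], [])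
      PySem.List.sorted st.2.1 (fun p => 2 * |p - h| + (if h ≤ p then 1 else 0)) ++ st.2.2

-- ===== PRECONDITION & SPEC =====
def Spec_scan_order_py (hint_page : Option Int) (pages_sorted : List Int) (band : Int) (out : List Int) : Prop := out = scan_order_py_alt hint_page pages_sorted band
instance (hint_page : Option Int) (pages_sorted : List Int) (band : Int) (out : List Int) : Decidable (Spec_scan_order_py hint_page pages_sorted band out) := by unfold Spec_scan_order_py; infer_instance

-- ===== CLAIM (what is proved, stated in full; the proofs are below) =====
def Claim_equal_scan_order_py : Prop := ∀ (hint_page : Option Int) (pages_sorted : List Int) (band : Int), Dom_scan_order_py hint_page pages_sorted band → Spec_scan_order_py hint_page pages_sorted band (scan_order_py hint_page pages_sorted band)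

-- ===== LEMMAS AND PROOFS =====

-- the sort key of B
def pvKey (h p : Int) : Int := 2 * |p - h| + (if h ≤ p then 1 else 0)

-- B's in-band test
def pvInB (h band p : Int) : Bool := decide (p = h ∨ |p - h| ≤ band)

-- the candidate pages A probes, in probing order
def pvCands (h : Int) (n : Nat) : List Int :=
  (List.range n).flatMap (fun i => [h - ((i : Int) + 1), h + ((i : Int) + 1)])

-- A's in-band result: candidates (hint first) filtered by membership
def pvFull (h : Int) (n : Nat) (pages : List Int) : List Int :=
  (h :: pvCands h n).filter (fun x => pages.contains x)

lemma mem_cands {h : Int} {n : Nat} {x : Int} :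
    x ∈ pvCands h n ↔ ∃ i : Nat, i < n ∧ (x = h - ((i : Int) + 1) ∨ x = h + ((i : Int) + 1)) := by
  simp [pvCands, List.mem_flatMap, List.mem_range]

lemma abs_le_of_mem_hc {h : Int} {n : Nat} {x : Int} (hx : x ∈ h :: pvCands h n) :
    |x - h| ≤ (n : Int) := by
  rw [List.mem_cons] at hx
  rcases hx with rfl | hx
  · simp
  · rcases mem_cands.1 hx with ⟨i, hi, rfl | rfl⟩ <;> (rw [abs_le]; constructor <;> (simp; omega))

lemma mem_hc_of_abs_le {h : Int} {n : Nat} {x : Int} (hx : |x - h| ≤ (n : Int)) :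
    x ∈ h :: pvCands h n := by
  by_cases hxh : x = h
  · simp [hxh]
  · right
    rw [abs_le] at hx
    rcases lt_or_gt_of_ne (sub_ne_zero.2 hxh) with hlt | hgt
    · exact mem_cands.2 ⟨(h - x - 1).toNat, by omega, Or.inl (by omega)⟩
    · exact mem_cands.2 ⟨(x - h - 1).toNat, by omega, Or.inr (by omega)⟩

lemma mem_full {h : Int} {n : Nat} {pages : List Int} {x : Int} :
    x ∈ pvFull h n pages ↔ x ∈ pages ∧ |x - h| ≤ (n : Int) := by
  constructor
  · intro hx
    have h1 := List.of_mem_filter hx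
    exact ⟨by simpa using h1, abs_le_of_mem_hc (List.mem_of_mem_filter hx)⟩
  · intro ⟨hp, hb⟩
    exact List.mem_filter.2 ⟨mem_hc_of_abs_le hb, by simpa using hp⟩

lemma pairwise_key_hc (h : Int) (n : Nat) :
    (h :: pvCands h n).Pairwise (fun a b => pvKey h a < pvKey h b) := by
  induction n with
  | zero => simp [pvCands]
  | succ n ih =>
    have hc : pvCands h (n + 1)
        = pvCands h n ++ [h - ((n : Int) + 1), h + ((n : Int) + 1)] := by
      simp [pvCands, List.range_succ]
    have key_lt : ∀ x ∈ h :: pvCands h n,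
        ∀ y ∈ ([h - ((n : Int) + 1), h + ((n : Int) + 1)] : List Int), pvKey h x < pvKey h y := by
      intro x hx y hy
      have hxb := abs_le_of_mem_hc hx
      have h1 : |h - ((n : Int) + 1) - h| = (n : Int) + 1 := by
        rw [show h - ((n : Int) + 1) - h = -((n : Int) + 1) by ring, abs_neg,
          abs_of_nonneg (by positivity)]
      have h2 : |h + ((n : Int) + 1) - h| = (n : Int) + 1 := by
        rw [show h + ((n : Int) + 1) - h = ((n : Int) + 1) by ring, abs_of_nonneg (by positivity)]
      rw [List.mem_cons, List.mem_singleton] at hy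
      rcases hy with rfl | rfl
      · simp only [pvKey, h1]
        split_ifs <;> omega
      · simp only [pvKey, h2]
        split_ifs <;> omega
    have hpair2 : ([h - ((n : Int) + 1), h + ((n : Int) + 1)] : List Int).Pairwise
        (fun a b => pvKey h a < pvKey h b) := by
      simp only [List.pairwise_cons, List.Pairwise.nil, List.mem_singleton]
      refine ⟨fun y hy => ?_, by simp⟩
      subst hy
      simp only [pvKey]
      have h1 : |h - ((n : Int) + 1) - h| = (n : Int) + 1 := by
        rw [show h - ((n : Int) + 1) - h = -((n : Int) + 1) by ring, abs_neg,
          abs_of_nonneg (by positivity)]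
      have h2 : |h + ((n : Int) + 1) - h| = (n : Int) + 1 := by
        rw [show h + ((n : Int) + 1) - h = ((n : Int) + 1) by ring, abs_of_nonneg (by positivity)]
      rw [h1, h2]
      split_ifs <;> omega
    rw [hc, ← List.cons_append, List.pairwise_append]
    exact ⟨ih, hpair2, key_lt⟩

lemma pairwise_key_full (h : Int) (n : Nat) (pages : List Int) :
    (pvFull h n pages).Pairwise (fun a b => pvKey h a < pvKey h b) :=
  (pairwise_key_hc h n).filter _

lemma nodup_full (h : Int) (n : Nat) (pages : List Int) : (pvFull h n pages).Nodup :=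
  (pairwise_key_full h n pages).imp (fun hlt => by rintro rfl; omega)

-- pyRange 1 (band+1) enumerated as Nats
lemma pyRange_as_range (band : Int) :
    PySem.List.pyRange 1 (band + 1) = (List.range band.toNat).map (fun i : Nat => (i : Int) + 1) := by
  rw [PySem.List.pyRange]
  by_cases hb : (1 : Int) < band + 1
  · rw [if_neg (by norm_num), if_pos (by norm_num), if_pos hb]
    rw [show ((band + 1 - 1 + 1 - 1 : Int) / 1).toNat = band.toNat by omega]
    exact List.map_congr_left (fun k _ => by ring)
  · rw [if_neg (by norm_num), if_pos (by norm_num), if_neg hb]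
    have : band.toNat = 0 := by omega
    simp [this]

lemma not_mem_full_of_abs_gt {h : Int} {n : Nat} {pages : List Int} {x : Int}
    (hx : (n : Int) < |x - h|) : x ∉ pvFull h n pages := fun hm => by
  have := (mem_full.1 hm).2; omega

-- A's probing loop computes pvFull (seen and ordered both)
lemma A_loop (h : Int) (pages : List Int) (n : Nat) :
    ((List.range n).map (fun i : Nat => (i : Int) + 1)).foldl (fun st delta =>
          let lower := h - delta
          let upper := h + delta
          let st1 := if pages.contains lower && !(PySem.Set.contains st.1 lower)
                     then (PySem.Set.add st.1 lower, st.2 ++ [lower]) else st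
          if pages.contains upper && !(PySem.Set.contains st1.1 upper)
          then (PySem.Set.add st1.1 upper, st1.2 ++ [upper]) else st1)
        (pvFull h 0 pages, pvFull h 0 pages)
      = (pvFull h n pages, pvFull h n pages) := by
  induction n with
  | zero => simp
  | succ n ih =>
    rw [List.range_succ, List.map_append, List.foldl_append, ih]
    simp only [List.map_cons, List.map_nil, List.foldl_cons, List.foldl_nil]
    have habsL : (n : Int) < |h - ((n : Int) + 1) - h| := by
      rw [show h - ((n : Int) + 1) - h = -((n : Int) + 1) by ring, abs_neg,
        abs_of_nonneg (by positivity)]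
      omega
    have habsU : (n : Int) < |h + ((n : Int) + 1) - h| := by
      rw [show h + ((n : Int) + 1) - h = ((n : Int) + 1) by ring, abs_of_nonneg (by positivity)]
      omega
    have hL' : h - ((n : Int) + 1) ∉ pvFull h n pages := not_mem_full_of_abs_gt habsL
    have hU' : h + ((n : Int) + 1) ∉ pvFull h n pages := not_mem_full_of_abs_gt habsU
    have hne : h + ((n : Int) + 1) ≠ h - ((n : Int) + 1) := by omega
    have hfull : pvFull h (n + 1) pages
        = pvFull h n pages
          ++ ([h - ((n : Int) + 1), h + ((n : Int) + 1)].filter (fun x => pages.contains x)) := by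
      rw [pvFull, pvFull, show pvCands h (n + 1)
          = pvCands h n ++ [h - ((n : Int) + 1), h + ((n : Int) + 1)] by
            simp [pvCands, List.range_succ],
        ← List.cons_append, List.filter_append]
    by_cases hcL : h - ((n : Int) + 1) ∈ pages <;>
      by_cases hcU : h + ((n : Int) + 1) ∈ pages <;>
      simp [hfull, PySem.Set.add, PySem.Set.contains, hL', hU', hne, hcL, hcU]

lemma dedup_append_singleton (l : List Int) (p : Int) :
    PySem.List.dedup (l ++ [p])
      = if l.contains p then PySem.List.dedup l else PySem.List.dedup l ++ [p] := by
  rw [PySem.List.dedup_eq_ofList, PySem.List.dedup_eq_ofList, PySem.Set.ofList_eq_foldl,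
    PySem.Set.ofList_eq_foldl, List.foldl_append, List.foldl_cons, List.foldl_nil]
  rw [PySem.Set.add]
  have hcc : (PySem.Set.contains (List.foldl PySem.Set.add [] l) p) = l.contains p := by
    rw [← PySem.Set.ofList_eq_foldl, PySem.Set.contains]
    by_cases hp : p ∈ l
    · rw [List.contains_iff_mem.2 ((PySem.Set.mem_ofList l p).2 hp), List.contains_iff_mem.2 hp]
    · have h1 : List.contains (PySem.Set.ofList l) p = false := by
        rw [Bool.eq_false_iff]
        exact fun hc => hp ((PySem.Set.mem_ofList l p).1 (List.contains_iff_mem.1 hc))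
      have h2 : l.contains p = false := by
        rw [Bool.eq_false_iff]; exact fun hc => hp (List.contains_iff_mem.1 hc)
      rw [h1, h2]
  rw [hcc]

-- B's split pass computes the deduped in-band list and the out-of-band list
lemma B_loop (h band : Int) (pages : List Int) :
    pages.foldl (fun (st : PySem.Set Int × List Int × List Int) p =>
          if p = h ∨ |p - h| ≤ band then
            if PySem.Set.contains st.1 p then st
            else (PySem.Set.add st.1 p, st.2.1 ++ [p], st.2.2)
          else (st.1, st.2.1, st.2.2 ++ [p])) (PySem.Set.empty, [], [])
      = (PySem.List.dedup (pages.filter (pvInB h band)),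
         PySem.List.dedup (pages.filter (pvInB h band)),
         pages.filter (fun p => !(pvInB h band p))) := by
  induction pages using List.reverseRecOn with
  | nil => simp [PySem.Set.empty, PySem.List.dedup, PySem.Set.ofList]
  | append_singleton ps p ih =>
    rw [List.foldl_append, ih, List.foldl_cons, List.foldl_nil]
    by_cases hin : p = h ∨ |p - h| ≤ band
    · have hb : pvInB h band p = true := decide_eq_true hin
      have hfil : (ps ++ [p]).filter (pvInB h band) = ps.filter (pvInB h band) ++ [p] := by
        simp [List.filter_append, hb]
      have hneg : (ps ++ [p]).filter (fun q => !(pvInB h band q))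
          = ps.filter (fun q => !(pvInB h band q)) := by
        simp [List.filter_append, hb]
      rw [if_pos hin, hfil, hneg, dedup_append_singleton]
      by_cases hc : (ps.filter (pvInB h band)).contains p = true
      · have hc2 : PySem.Set.contains (PySem.List.dedup (ps.filter (pvInB h band))) p = true := by
          rw [PySem.Set.contains, List.contains_iff_mem, PySem.List.mem_dedup]
          exact List.contains_iff_mem.1 hc
        rw [if_pos hc, if_pos hc2]
      · have hc2 : PySem.Set.contains (PySem.List.dedup (ps.filter (pvInB h band))) p = false := by
          rw [PySem.Set.contains, Bool.eq_false_iff]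
          exact fun hbm => hc (List.contains_iff_mem.2
            ((PySem.List.mem_dedup _ _).1 (List.contains_iff_mem.1 hbm)))
        rw [if_neg hc, if_neg (by rw [hc2]; exact Bool.false_ne_true)]
        simp only [PySem.Set.add, hc2, Bool.false_eq_true, ite_false]
    · have hb : pvInB h band p = false := by
        rw [pvInB, decide_eq_false_iff_not]; exact hin
      have hfil : (ps ++ [p]).filter (pvInB h band) = ps.filter (pvInB h band) := by
        simp [List.filter_append, hb]
      have hneg : (ps ++ [p]).filter (fun q => !(pvInB h band q))
          = ps.filter (fun q => !(pvInB h band q)) ++ [p] := by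
        simp [List.filter_append, hb]
      rw [if_neg hin, hfil, hneg]

lemma inB_iff (h band p : Int) :
    pvInB h band p = true ↔ |p - h| ≤ (band.toNat : Int) := by
  simp only [pvInB, decide_eq_true_eq, abs_le]
  omega

-- the final pass over pages appends exactly the unseen pages
lemma foldl_filter_append (seen : PySem.Set Int) (pages acc : List Int) :
    List.foldl (fun ordered page =>
        if !(PySem.Set.contains seen page) then ordered ++ [page] else ordered) acc pages
      = acc ++ pages.filter (fun p => !(seen.contains p)) := by
  have := PySem.List.foldl_append_if (fun p => !(List.contains seen p)) (fun p => p) pages acc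
  simpa [PySem.Set.contains] using this

-- ===== VERDICT (by name: the statement is the Claim_ definition above) =====
theorem scan_order_py_spec : Claim_equal_scan_order_py := by
  intro hint_page pages band _
  unfold Spec_scan_order_py
  cases hint_page with
  | none =>
      simp only [scan_order_py, scan_order_py_alt]
      rw [show scan_order_seed none pages band = (PySem.Set.empty, []) from rfl]
      rw [foldl_filter_append]
      simp [PySem.Set.contains, PySem.Set.empty]
  | some h =>
      simp only [scan_order_py, scan_order_py_alt]
      by_cases hh : h = 0
      · subst hh
        rw [show scan_order_seed (some 0) pages band = (PySem.Set.empty, []) by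
          rw [scan_order_seed]; simp]
        rw [if_pos rfl, foldl_filter_append]
        simp [PySem.Set.contains, PySem.Set.empty]
      · rw [if_neg hh]
        have hseed : scan_order_seed (some h) pages band
            = (pvFull h band.toNat pages, pvFull h band.toNat pages) := by
          rw [scan_order_seed]
          simp only [if_pos hh, ne_eq]
          rw [show (if pages.contains h = true then
                ((PySem.Set.add PySem.Set.empty h : PySem.Set Int), ([h] : List Int))
              else (PySem.Set.empty, [])) = (pvFull h 0 pages, pvFull h 0 pages) by
            by_cases hm : h ∈ pages <;>
              simp [pvFull, pvCands, PySem.Set.add, PySem.Set.contains, PySem.Set.empty, hm]]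
          rw [pyRange_as_range, A_loop]
        rw [hseed, B_loop]
        simp only
        -- heads and tails separately
        have hkey : (fun p => 2 * |p - h| + (if h ≤ p then 1 else 0)) = pvKey h := by
          funext p; rw [pvKey]
        have hmem : ∀ x : Int,
            x ∈ pvFull h band.toNat pages
              ↔ x ∈ PySem.List.dedup (pages.filter (pvInB h band)) := by
          intro x
          rw [mem_full, PySem.List.mem_dedup, List.mem_filter, inB_iff]
        have hperm : (pvFull h band.toNat pages).Perm
            (PySem.List.dedup (pages.filter (pvInB h band))) :=
          (List.perm_ext_iff_of_nodup (nodup_full h band.toNat pages)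
            (PySem.List.nodup_dedup _)).2 hmem
        have hhead : PySem.List.sorted (PySem.List.dedup (pages.filter (pvInB h band))) (pvKey h)
            = pvFull h band.toNat pages :=
          PySem.List.sorted_eq_of_perm_of_pairwise_lt _ _ _ hperm
            (pairwise_key_full h band.toNat pages)
        have htail : pages.filter (fun p => !((pvFull h band.toNat pages).contains p))
            = pages.filter (fun p => !(pvInB h band p)) := by
          apply List.filter_congr
          intro p hp
          have hcp : (pvFull h band.toNat pages).contains p = pvInB h band p := by
            by_cases hb : |p - h| ≤ (band.toNat : Int)
            · rw [List.contains_iff_mem.2 (mem_full.2 ⟨hp, hb⟩), (inB_iff h band p).2 hb]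
            · have h1 : (pvFull h band.toNat pages).contains p = false := by
                rw [Bool.eq_false_iff]
                exact fun hcc => hb (mem_full.1 (List.contains_iff_mem.1 hcc)).2
              have h2 : pvInB h band p = false := by
                rw [Bool.eq_false_iff]; exact fun hcc => hb ((inB_iff h band p).1 hcc)
              rw [h1, h2]
          rw [hcp]
        rw [foldl_filter_append]
        simp only [PySem.Set.contains]
        rw [htail, hkey, hhead]
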